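-- pv_equiv track=rewrite | github.com/NamHoKi/Algorithm-Study | 프로그래머스/unrated/138477. 명예의 전당 （1）/명예의 전당 （1）.py | solution
-- ===== SOURCE A (Python) =====
-- def solution(k, score):
--     answer = []
--     k_list = []
--
--     for s in score:
--         k_list.append(s)
--         k_list.sort(reverse=True)
--         if len(k_list) > k :
--             k_list.pop(-1)
--         answer.append(k_list[-1])
--
--     return answer
-- ===== SOURCE B (Python) =====
-- def solution(k, score):
--     # Bag of the current top-k scores kept UNSORTED; only the running minimum
--     # is tracked, so no sorting is ever done.
--     answer = []
--     bag = []
--     cur = None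
--     for s in score:
--         if len(bag) < k:
--             bag.append(s)
--             cur = s if cur is None else min(cur, s)
--         elif s > cur:
--             bag[bag.index(cur)] = s
--             cur = min(bag)
--         answer.append(cur)
--     return answer
-- ===== Notes on version B (the rewrite author's own statement) =====
-- stated objective: alternative
-- what changed: A re-sorts the whole top-k window on every score and pops the tail; B keeps the window as an unsorted bag with an O(1)-maintained running minimum, replacing that minimum in place only when a new score beats it, so no sorting is ever done.
import Mathlib
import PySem

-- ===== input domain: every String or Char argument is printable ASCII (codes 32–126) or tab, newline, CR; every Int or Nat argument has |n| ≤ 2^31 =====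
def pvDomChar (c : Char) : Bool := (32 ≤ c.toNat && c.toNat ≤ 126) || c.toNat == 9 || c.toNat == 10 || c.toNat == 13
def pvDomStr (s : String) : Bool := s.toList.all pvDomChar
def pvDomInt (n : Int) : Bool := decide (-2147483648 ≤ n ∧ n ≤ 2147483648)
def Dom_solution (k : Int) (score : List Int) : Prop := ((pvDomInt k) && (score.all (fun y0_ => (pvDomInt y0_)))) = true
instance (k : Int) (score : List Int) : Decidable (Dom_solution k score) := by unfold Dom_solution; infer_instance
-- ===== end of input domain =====

-- B replaces A's sort-every-step window with an unsorted top-k bag plus a tracked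
-- minimum (replace-the-min on overflow): no sorting at all (objective: alternative).

-- ===== PORT A =====
-- one iteration of A's loop; state = (answer, k_list)
def solutionStepA (k : Int) (st : List Int × List Int) (s : Int) : List Int × List Int :=
  let kl0 := PySem.List.sorted (st.2 ++ [s]) (fun x => x) true
  let kl1 := if ((kl0.length : Int) > k) then ((PySem.List.pop? kl0 (-1)).map Prod.snd).getD kl0 else kl0
  -- answer.append(k_list[-1]); pyGet? is none only on the empty list, where Python raises (outside Pre_)
  (st.1 ++ [(PySem.List.pyGet? kl1 (-1)).getD 0], kl1)

def solution (k : Int) (score : List Int) : List Int :=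
  (score.foldl (solutionStepA k) ([], [])).1

-- ===== PORT B =====
-- cur = s if cur is None else min(cur, s)
def newMin (cur : Option Int) (s : Int) : Option Int :=
  match cur with
  | none => some s
  | some c => some (min c s)

-- one iteration of B's loop; state = (answer, bag, cur); cur = none models Python's initial `cur = None`
def solutionStepB (k : Int) (st : List Int × List Int × Option Int) (s : Int) : List Int × List Int × Option Int :=
  match st with
  | (ans, bag, cur) =>
    if ((bag.length : Int) < k) then
      let bag' := bag ++ [s]
      let cur' := newMin cur s
      (ans ++ [cur'.getD 0], bag', cur')
    else
      match cur with
      | some c =>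
        if c < s then
          let bag' := match PySem.List.index? bag c with
                      | some i => bag.set i s
                      | none   => bag
          let cur' := PySem.List.min? bag' (fun x => x)
          (ans ++ [cur'.getD 0], bag', cur')
        else (ans ++ [c], bag, some c)
      | none => (ans, bag, none)  -- Python raises TypeError comparing to None; unreachable inside Pre_

def solution_alt (k : Int) (score : List Int) : List Int :=
  (score.foldl (solutionStepB k) ([], [], none)).1

-- ===== PRECONDITION & SPEC =====
-- Pre_ excludes k ≤ 0 with a nonempty score, where Python A raises IndexError
-- (k_list[-1] after popping the only element); B raises TypeError there too.
def Pre_solution (k : Int) (score : List Int) : Prop := score = [] ∨ 1 ≤ k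
instance (k : Int) (score : List Int) : Decidable (Pre_solution k score) := by unfold Pre_solution; infer_instance
def pvWitness_solution : Int × List Int := (2, [3, 1, 4])

def Spec_solution (k : Int) (score : List Int) (out : List Int) : Prop := out = solution_alt k score
instance (k : Int) (score : List Int) (out : List Int) : Decidable (Spec_solution k score out) := by unfold Spec_solution; infer_instance

-- ===== CLAIM (what is proved, stated in full; the proofs are below) =====
def Claim_equal_solution : Prop := ∀ (k : Int) (score : List Int), Dom_solution k score → Pre_solution k score → Spec_solution k score (solution k score)

-- ===== LEMMAS AND PROOFS =====

-- the loop invariant tying A's state to B's state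
def InvAB (k : Int) (a : List Int × List Int) (b : List Int × List Int × Option Int) : Prop :=
  a.1 = b.1 ∧ a.2.Perm b.2.1 ∧ a.2.Pairwise (fun x y => y ≤ x) ∧ (a.2.length : Int) ≤ k ∧
  b.2.2 = PySem.List.min? b.2.1 (fun x => x)

theorem min?_singleton_id (s : Int) : PySem.List.min? [s] (fun x => x) = some s := by
  cases h : PySem.List.min? [s] (fun x => x) with
  | none => rw [PySem.List.min?_eq_none_iff] at h; simp at h
  | some m =>
      have hm : m ∈ [s] := PySem.List.min?_mem h
      simp at hm; rw [hm]

theorem min?_snoc (bag : List Int) (s c : Int)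
    (hc : PySem.List.min? bag (fun x => x) = some c) :
    PySem.List.min? (bag ++ [s]) (fun x => x) = some (min c s) := by
  have hne : bag ++ [s] ≠ [] := by simp
  cases h : PySem.List.min? (bag ++ [s]) (fun x => x) with
  | none => rw [PySem.List.min?_eq_none_iff] at h; exact absurd h hne
  | some m =>
      have hmem := PySem.List.min?_mem h
      have hmin : ∀ y ∈ bag ++ [s], m ≤ y := fun y hy => PySem.List.min?_isMin h y hy
      have hcmem : c ∈ bag := PySem.List.min?_mem hc
      have hcmin : ∀ y ∈ bag, c ≤ y := fun y hy => PySem.List.min?_isMin hc y hy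
      have h1 : m ≤ c := hmin c (by simp [hcmem])
      have h2 : m ≤ s := hmin s (by simp)
      have h3 : min c s ≤ m := by
        rcases List.mem_append.mp hmem with hb | hs
        · have := hcmin m hb; omega
        · simp at hs; omega
      exact congrArg some (le_antisymm (le_min h1 h2) h3)

theorem min?_id_eq_of_perm (xs ys : List Int) (h : xs.Perm ys) :
    PySem.List.min? xs (fun x => x) = PySem.List.min? ys (fun x => x) := by
  cases hx : PySem.List.min? xs (fun x => x) with
  | none =>
      rw [PySem.List.min?_eq_none_iff] at hx
      subst hx
      have hys : ys = [] := h.nil_eq.symm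
      subst hys
      exact ((PySem.List.min?_eq_none_iff _ _).mpr rfl).symm
  | some m =>
      cases hy : PySem.List.min? ys (fun x => x) with
      | none =>
          rw [PySem.List.min?_eq_none_iff] at hy
          subst hy
          have hxs : xs = [] := h.eq_nil
          rw [hxs, (PySem.List.min?_eq_none_iff _ _).mpr rfl] at hx
          simp at hx
      | some m' =>
          have h1 : m ≤ m' := PySem.List.min?_isMin hx m' (h.mem_iff.mpr (PySem.List.min?_mem hy))
          have h2 : m' ≤ m := PySem.List.min?_isMin hy m (h.mem_iff.mp (PySem.List.min?_mem hx))
          exact congrArg some (le_antisymm h1 h2)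

theorem getLast?_le_of_pairwise : ∀ (xs : List Int), xs.Pairwise (fun x y => y ≤ x) →
    ∀ m : Int, xs.getLast? = some m → ∀ y ∈ xs, m ≤ y := by
  intro xs
  induction xs with
  | nil => intro _ m hm; simp at hm
  | cons x t ih =>
      intro h m hm y hy
      rcases List.pairwise_cons.mp h with ⟨hx, ht⟩
      cases t with
      | nil =>
          simp at hm; subst hm
          simp at hy; omega
      | cons z t' =>
          have hm' : (z :: t').getLast? = some m := by
            rw [List.getLast?_cons_cons] at hm; exact hm
          have hmem : m ∈ z :: t' := List.mem_of_getLast? hm'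
          rcases List.mem_cons.mp hy with rfl | hy'
          · exact hx m hmem
          · exact ih ht m hm' y hy'

theorem getLast?_eq_min?_of_pairwise (xs : List Int) (h : xs.Pairwise (fun x y => y ≤ x)) :
    xs.getLast? = PySem.List.min? xs (fun x => x) := by
  cases hx : xs.getLast? with
  | none =>
      rw [List.getLast?_eq_none_iff] at hx; subst hx
      exact ((PySem.List.min?_eq_none_iff _ _).mpr rfl).symm
  | some m =>
      have hne : xs ≠ [] := by
        intro hnil; subst hnil; simp at hx
      cases hy : PySem.List.min? xs (fun x => x) with
      | none => rw [PySem.List.min?_eq_none_iff] at hy; exact absurd hy hne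
      | some m' =>
          have h1 : m ≤ m' := getLast?_le_of_pairwise xs h m hx m' (PySem.List.min?_mem hy)
          have h2 : m' ≤ m := PySem.List.min?_isMin hy m (List.mem_of_getLast? hx)
          exact congrArg some (le_antisymm h1 h2)

theorem set_at_pre_length (pre suf : List Int) (c s : Int) :
    (pre ++ c :: suf).set pre.length s = pre ++ s :: suf := by
  induction pre with
  | nil => simp
  | cons p t ih => simp [ih]

-- one synchronized loop step preserves the invariant
theorem step_inv (k : Int) (hk : 1 ≤ k) (s : Int)
    (a : List Int × List Int) (b : List Int × List Int × Option Int)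
    (h : InvAB k a b) : InvAB k (solutionStepA k a s) (solutionStepB k b s) := by
  obtain ⟨ansA, kl⟩ := a
  obtain ⟨ansB, bag, cur⟩ := b
  obtain ⟨hans, hperm, hsorted, hlen, hcur⟩ := h
  simp only at hans hperm hsorted hlen hcur
  have hlenbag : bag.length = kl.length := hperm.length_eq.symm
  set kl0 := PySem.List.sorted (kl ++ [s]) (fun x => x) true with hkl0def
  have hkl0perm : kl0.Perm (kl ++ [s]) := PySem.List.sorted_perm _ _ _
  have hkl0len : kl0.length = kl.length + 1 := by
    rw [hkl0def, PySem.List.length_sorted]; simp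
  have hkl0sorted : kl0.Pairwise (fun x y => y ≤ x) := PySem.List.sorted_pairwise_rev _ _
  have hkl0ne : kl0 ≠ [] := by
    intro hnil; rw [hnil] at hkl0len; simp at hkl0len
  by_cases hc : (bag.length : Int) < k
  · -- room in the window: both just insert s
    have hnopop : ¬ ((kl0.length : Int) > k) := by
      rw [hkl0len]; push_cast; push_cast at hc; omega
    have hstepA : solutionStepA k (ansA, kl) s = (ansA ++ [kl0.getLast?.getD 0], kl0) := by
      simp only [solutionStepA, PySem.List.pyGet?_neg_one]
      rw [← hkl0def, if_neg hnopop]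
    have hcurnew : newMin cur s = PySem.List.min? (bag ++ [s]) (fun x => x) := by
      cases hcb : PySem.List.min? bag (fun x => x) with
      | none =>
          have hbnil := (PySem.List.min?_eq_none_iff _ _).mp hcb
          rw [hcur, hcb, hbnil]
          simp only [newMin, List.nil_append]
          exact (min?_singleton_id s).symm
      | some c =>
          rw [hcur, hcb]
          simp only [newMin]
          exact (min?_snoc bag s c hcb).symm
    have hstepB : solutionStepB k (ansB, bag, cur) s =
        (ansB ++ [(PySem.List.min? (bag ++ [s]) (fun x => x)).getD 0], bag ++ [s],
          PySem.List.min? (bag ++ [s]) (fun x => x)) := by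
      simp only [solutionStepB]
      rw [if_pos hc, hcurnew]
    have hmin : kl0.getLast? = PySem.List.min? (bag ++ [s]) (fun x => x) := by
      rw [getLast?_eq_min?_of_pairwise kl0 hkl0sorted]
      exact min?_id_eq_of_perm _ _ (hkl0perm.trans (hperm.append_right [s]))
    rw [hstepA, hstepB]
    refine ⟨by rw [hans, hmin], hkl0perm.trans (hperm.append_right [s]), hkl0sorted, ?_, rfl⟩
    simp only [hkl0len]; push_cast; push_cast at hc; omega
  · -- full window: A sorts and pops a minimum; B replaces its tracked min if beaten
    have hbagk : (bag.length : Int) = k := by omega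
    have hbagne : bag ≠ [] := by
      intro hnil; subst hnil; simp at hbagk; omega
    have hpop : ((kl0.length : Int) > k) := by
      rw [hkl0len]; push_cast; omega
    obtain ⟨c0, hc0⟩ : ∃ c0, PySem.List.min? bag (fun x => x) = some c0 := by
      cases hm : PySem.List.min? bag (fun x => x) with
      | none => exact absurd ((PySem.List.min?_eq_none_iff _ _).mp hm) hbagne
      | some c0 => exact ⟨c0, rfl⟩
    have hcur' : cur = some c0 := by rw [hcur, hc0]
    subst hcur'
    have hdecomp : kl0 = kl0.dropLast ++ [kl0.getLast hkl0ne] :=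
      (List.dropLast_append_getLast hkl0ne).symm
    set ys := kl0.dropLast with hys
    set m := kl0.getLast hkl0ne with hm
    have hlast : kl0.getLast? = some m := List.getLast?_eq_some_getLast hkl0ne
    have hpopres : ((PySem.List.pop? kl0 (-1)).map Prod.snd).getD kl0 = ys := by
      rw [hdecomp, PySem.List.pop?_last]; rfl
    have hstepA : solutionStepA k (ansA, kl) s = (ansA ++ [ys.getLast?.getD 0], ys) := by
      simp only [solutionStepA, PySem.List.pyGet?_neg_one]
      rw [← hkl0def, if_pos hpop, hpopres]
    have hyslen : ys.length = kl.length := by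
      have h1 := hkl0len
      rw [hdecomp] at h1
      simp at h1
      simpa [hys] using h1
    have hysne : ys ≠ [] := by
      intro hnil; rw [hnil] at hyslen
      simp at hyslen; omega
    have hyssorted : ys.Pairwise (fun x y => y ≤ x) := by
      have hsub : ys.Sublist kl0 := by
        conv_rhs => rw [hdecomp]
        exact List.sublist_append_left _ _
      exact hkl0sorted.sublist hsub
    have hmval : some m = PySem.List.min? (bag ++ [s]) (fun x => x) := by
      rw [← hlast, getLast?_eq_min?_of_pairwise kl0 hkl0sorted]
      exact min?_id_eq_of_perm _ _ (hkl0perm.trans (hperm.append_right [s]))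
    have hmmin : ∀ y ∈ bag ++ [s], m ≤ y :=
      fun y hy => PySem.List.min?_isMin hmval.symm y hy
    have hmmem : m ∈ bag ++ [s] := PySem.List.min?_mem hmval.symm
    have hc0min : ∀ y ∈ bag, c0 ≤ y := fun y hy => PySem.List.min?_isMin hc0 y hy
    have hc0mem : c0 ∈ bag := PySem.List.min?_mem hc0
    have hysperm : (ys ++ [m]).Perm (bag ++ [s]) := by
      rw [← hdecomp]; exact hkl0perm.trans (hperm.append_right [s])
    by_cases hgt : c0 < s
    · -- s beats the current minimum: m = c0, B replaces one occurrence of c0 by s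
      have hmc0 : m = c0 := by
        have h1 : m ≤ c0 := hmmin c0 (by simp [hc0mem])
        have h2 : c0 ≤ m := by
          rcases List.mem_append.mp hmmem with hmb | hms
          · exact hc0min m hmb
          · simp at hms; omega
        omega
      obtain ⟨i, hi⟩ : ∃ i, PySem.List.index? bag c0 = some i := by
        cases hix : PySem.List.index? bag c0 with
        | none => rw [PySem.List.index?_eq_none_iff] at hix; exact absurd hc0mem hix
        | some i => exact ⟨i, rfl⟩
      obtain ⟨pre, suf, hbag, hprelen, _⟩ := (PySem.List.index?_eq_some_iff _ _ _).mp hi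
      have hset : bag.set i s = pre ++ s :: suf := by
        rw [hbag, ← hprelen, set_at_pre_length]
      have hpermset : ys.Perm (bag.set i s) := by
        rw [← List.perm_append_right_iff [c0]]
        rw [hmc0] at hysperm
        refine hysperm.trans ?_
        rw [hset, hbag]
        refine (List.perm_iff_count).mpr (fun a => ?_)
        simp [List.count_append, List.count_cons]
        omega
      have hstepB : solutionStepB k (ansB, bag, some c0) s =
          (ansB ++ [(PySem.List.min? (bag.set i s) (fun x => x)).getD 0], bag.set i s,
            PySem.List.min? (bag.set i s) (fun x => x)) := by
        simp only [solutionStepB]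
        rw [if_neg hc]
        simp only [if_pos hgt, hi]
      have hysmin : ys.getLast? = PySem.List.min? (bag.set i s) (fun x => x) := by
        rw [getLast?_eq_min?_of_pairwise ys hyssorted]
        exact min?_id_eq_of_perm _ _ hpermset
      rw [hstepA, hstepB]
      refine ⟨by rw [hans, hysmin], hpermset, hyssorted, ?_, rfl⟩
      simp only [hyslen]; omega
    · -- s does not beat the minimum: A pops s right back out, the window is unchanged
      have hms : m = s := by
        have h1 : m ≤ s := hmmin s (by simp)
        have h2 : s ≤ m := by
          rcases List.mem_append.mp hmmem with hmb | hmss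
          · have := hc0min m hmb; omega
          · simp at hmss; omega
        omega
      have hpermbag : ys.Perm bag := by
        rw [← List.perm_append_right_iff [s]]
        rw [hms] at hysperm
        exact hysperm
      have hstepB : solutionStepB k (ansB, bag, some c0) s = (ansB ++ [c0], bag, some c0) := by
        simp only [solutionStepB]
        rw [if_neg hc]
        simp only [if_neg hgt]
      have hysmin : ys.getLast? = some c0 := by
        rw [getLast?_eq_min?_of_pairwise ys hyssorted,
          min?_id_eq_of_perm _ _ hpermbag, hc0]
      rw [hstepA, hstepB]
      refine ⟨by rw [hans, hysmin]; rfl, hpermbag, hyssorted, ?_, by rw [hc0]⟩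
      simp only [hyslen]; omega

theorem fold_inv (k : Int) (hk : 1 ≤ k) (score : List Int) :
    ∀ (a : List Int × List Int) (b : List Int × List Int × Option Int), InvAB k a b →
      InvAB k (score.foldl (solutionStepA k) a) (score.foldl (solutionStepB k) b) := by
  induction score with
  | nil => intro a b h; exact h
  | cons s t ih =>
      intro a b h
      exact ih _ _ (step_inv k hk s a b h)

-- ===== VERDICT (by name: the statement is the Claim_ definition above) =====
theorem solution_spec : Claim_equal_solution := by
  intro k score _ hpre
  unfold Spec_solution
  rcases hpre with rfl | hk
  · rfl
  · have h0 : InvAB k ([], []) ([], [], none) := by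
      refine ⟨rfl, List.Perm.refl _, List.Pairwise.nil, by simp; omega, ?_⟩
      exact ((PySem.List.min?_eq_none_iff _ _).mpr rfl).symm
    obtain ⟨h1, -, -, -, -⟩ := fold_inv k hk score ([], []) ([], [], none) h0
    simpa [solution, solution_alt] using h1
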